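-- pv_equiv track=rewrite | github.com/pypi-data/pypi-mirror-216 | packages/bfgcardplay/bfgcardplay-1.0.7-py3-none-any.whl/bfgcardplay/source/utilities.py | get_list_of_best_scores
-- ===== SOURCE A (Python) =====
-- from typing import List, Dict
--
-- def get_list_of_best_scores(candidates: Dict[object, int], reverse: bool = False) -> List[object]:
--     """Return a list of the best scoring candidates from a dict of candidates."""
--     best_candidates = []
--     max_score = 0
--     min_score = 0
--     for key, score in candidates.items():
--         if score > max_score:
--             max_score = score
--
--     if reverse:
--         min_score = max_score
--         for key, score in candidates.items():
--             if score < min_score: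
--                 min_score = score
--
--     for key, score in candidates.items():
--         if reverse:
--             if score == min_score:
--                 best_candidates.append(key)
--         else:
--             if score == max_score:
--                 best_candidates.append(key)
--     return best_candidates
-- ===== SOURCE B (Python) =====
-- def get_list_of_best_scores(candidates, reverse=False):
--     """Return a list of the best scoring candidates from a dict of candidates."""
--     if reverse:
--         best = []
--         best_score = None
--         for key, score in candidates.items():
--             if best_score is None or score < best_score:
--                 best = [key]
--                 best_score = score
--             elif score == best_score:
--                 best.append(key)
--         return best
--     else:
--         best = []
--         best_score = 0
--         for key, score in candidates.items():
--             if score > best_score: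
--                 best = [key]
--                 best_score = score
--             elif score == best_score:
--                 best.append(key)
--         return best
-- ===== Notes on version B (the rewrite author's own statement) =====
-- stated objective: alternative
-- what changed: Replaces A's three separate passes (max pass, conditional min pass, collection pass) by a single pass that maintains the running best score and resets/extends the best list as it goes, keeping A's 0-floor for the max case and a None start for the min case.
import Mathlib
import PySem

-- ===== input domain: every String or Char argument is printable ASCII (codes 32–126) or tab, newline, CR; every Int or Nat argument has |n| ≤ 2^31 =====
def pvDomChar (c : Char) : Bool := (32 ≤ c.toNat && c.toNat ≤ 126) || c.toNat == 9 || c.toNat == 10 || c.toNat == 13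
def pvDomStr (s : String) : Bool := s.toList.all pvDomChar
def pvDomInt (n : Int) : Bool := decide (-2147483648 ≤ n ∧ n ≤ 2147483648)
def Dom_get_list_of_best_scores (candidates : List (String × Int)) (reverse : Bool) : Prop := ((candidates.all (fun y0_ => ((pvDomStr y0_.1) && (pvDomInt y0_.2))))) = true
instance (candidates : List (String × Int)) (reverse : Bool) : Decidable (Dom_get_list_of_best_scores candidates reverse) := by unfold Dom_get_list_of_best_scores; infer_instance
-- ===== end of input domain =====

-- B replaces A's three passes over the dict (max pass, conditional min pass, collection
-- pass) by one pass keeping a running best score and best list; return value only.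

-- ===== PORT A =====
-- first loop: raise max_score when score > max_score (starts at 0)
def pvMaxStep (m : Int) (kv : String × Int) : Int := if kv.2 > m then kv.2 else m
-- second loop (reverse only): lower min_score when score < min_score (starts at max_score)
def pvMinStep (m : Int) (kv : String × Int) : Int := if kv.2 < m then kv.2 else m

def get_list_of_best_scores (candidates : List (String × Int)) (reverse : Bool) : List String :=
  let max_score : Int := candidates.foldl pvMaxStep 0
  let min_score : Int := if reverse then candidates.foldl pvMinStep max_score else 0
  candidates.foldl
    (fun best_candidates kv =>
      if reverse then
        (if kv.2 = min_score then best_candidates ++ [kv.1] else best_candidates)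
      else
        (if kv.2 = max_score then best_candidates ++ [kv.1] else best_candidates))
    []

-- ===== PORT B =====
-- single-pass step, non-reverse case: reset on a strictly larger score, append on a tie
def pvBStepMax (st : List String × Int) (kv : String × Int) : List String × Int :=
  if kv.2 > st.2 then ([kv.1], kv.2)
  else if kv.2 = st.2 then (st.1 ++ [kv.1], st.2)
  else st
-- single-pass step, reverse case: best score starts as None, reset on strictly smaller
def pvBStepMin (st : List String × Option Int) (kv : String × Int) : List String × Option Int :=
  match st.2 with
  | none => ([kv.1], some kv.2)
  | some b =>
    if kv.2 < b then ([kv.1], some kv.2)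
    else if kv.2 = b then (st.1 ++ [kv.1], st.2)
    else st

def get_list_of_best_scores_alt (candidates : List (String × Int)) (reverse : Bool) : List String :=
  if reverse then (candidates.foldl pvBStepMin ([], none)).1
  else (candidates.foldl pvBStepMax ([], (0 : Int))).1

-- ===== PRECONDITION & SPEC =====
def Spec_get_list_of_best_scores (candidates : List (String × Int)) (reverse : Bool) (out : List String) : Prop := out = get_list_of_best_scores_alt candidates reverse
instance (candidates : List (String × Int)) (reverse : Bool) (out : List String) : Decidable (Spec_get_list_of_best_scores candidates reverse out) := by unfold Spec_get_list_of_best_scores; infer_instance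

-- ===== CLAIM (what is proved, stated in full; the proofs are below) =====
def Claim_equal_get_list_of_best_scores : Prop := ∀ (candidates : List (String × Int)) (reverse : Bool), Dom_get_list_of_best_scores candidates reverse → Spec_get_list_of_best_scores candidates reverse (get_list_of_best_scores candidates reverse)

-- ===== LEMMAS AND PROOFS =====

theorem le_foldl_maxStep (l : List (String × Int)) (b : Int) :
    b ≤ l.foldl pvMaxStep b := by
  induction l generalizing b with
  | nil => simp
  | cons kv t ih =>
    rw [List.foldl_cons]
    refine le_trans ?_ (ih (pvMaxStep b kv))
    simp only [pvMaxStep]; split_ifs with h <;> omega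

theorem foldl_minStep_le (l : List (String × Int)) (b : Int) :
    l.foldl pvMinStep b ≤ b := by
  induction l generalizing b with
  | nil => simp
  | cons kv t ih =>
    rw [List.foldl_cons]
    refine le_trans (ih (pvMinStep b kv)) ?_
    simp only [pvMinStep]; split_ifs with h <;> omega

-- A's collection loop is a filter of the list by the target score
theorem collect_eq_filter (l : List (String × Int)) (acc : List String) (target : Int) :
    l.foldl (fun best kv => if kv.2 = target then best ++ [kv.1] else best) acc
      = acc ++ (l.filter (fun kv => kv.2 = target)).map Prod.fst := by
  induction l generalizing acc with
  | nil => simp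
  | cons kv t ih =>
    simp only [List.foldl_cons, List.filter_cons]
    by_cases h : kv.2 = target <;> simp [h, ih, List.append_assoc]

-- characterisation of B's non-reverse single pass from an arbitrary state
theorem bmax_char (l : List (String × Int)) (acc : List String) (b : Int) :
    l.foldl pvBStepMax (acc, b)
      = ((if l.foldl pvMaxStep b = b then acc else [])
          ++ (l.filter (fun kv => kv.2 = l.foldl pvMaxStep b)).map Prod.fst,
         l.foldl pvMaxStep b) := by
  induction l generalizing acc b with
  | nil => simp
  | cons kv t ih =>
    simp only [List.foldl_cons, List.filter_cons]
    by_cases h1 : kv.2 > b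
    · have hstep : pvMaxStep b kv = kv.2 := by simp [pvMaxStep, h1]
      have hB : pvBStepMax (acc, b) kv = ([kv.1], kv.2) := by simp [pvBStepMax, h1]
      rw [hB]; simp only [hstep]; rw [ih]
      have hge : kv.2 ≤ t.foldl pvMaxStep kv.2 := le_foldl_maxStep t kv.2
      have hMb : t.foldl pvMaxStep kv.2 ≠ b := by omega
      by_cases h2 : kv.2 = t.foldl pvMaxStep kv.2
      · rw [← h2]
        have h2b : kv.2 ≠ b := by omega
        simp [h2b]
      · simp [h2, hMb, Ne.symm h2]
    · have hstep : pvMaxStep b kv = b := by simp [pvMaxStep, h1]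
      simp only [hstep]
      have hub : b ≤ t.foldl pvMaxStep b := le_foldl_maxStep t b
      by_cases h2 : kv.2 = b
      · have hB : pvBStepMax (acc, b) kv = (acc ++ [kv.1], b) := by
          simp [pvBStepMax, h2]
        rw [hB, ih]
        by_cases h3 : t.foldl pvMaxStep b = b
        · have h4 : kv.2 = t.foldl pvMaxStep b := by omega
          simp [h3, h4, List.append_assoc]
        · have h4 : ¬ kv.2 = t.foldl pvMaxStep b := by omega
          simp [h3, h4]
      · have hB : pvBStepMax (acc, b) kv = (acc, b) := by
          simp [pvBStepMax, h1, h2]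
        rw [hB, ih]
        have h4 : ¬ kv.2 = t.foldl pvMaxStep b := by omega
        simp [h4]

-- characterisation of B's reverse single pass from a `some` state
theorem bmin_char (l : List (String × Int)) (acc : List String) (b : Int) :
    l.foldl pvBStepMin (acc, some b)
      = ((if l.foldl pvMinStep b = b then acc else [])
          ++ (l.filter (fun kv => kv.2 = l.foldl pvMinStep b)).map Prod.fst,
         some (l.foldl pvMinStep b)) := by
  induction l generalizing acc b with
  | nil => simp
  | cons kv t ih =>
    simp only [List.foldl_cons, List.filter_cons]
    by_cases h1 : kv.2 < b
    · have hstep : pvMinStep b kv = kv.2 := by simp [pvMinStep, h1]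
      have hB : pvBStepMin (acc, some b) kv = ([kv.1], some kv.2) := by
        simp [pvBStepMin, h1]
      rw [hB]; simp only [hstep]; rw [ih]
      have hge : t.foldl pvMinStep kv.2 ≤ kv.2 := foldl_minStep_le t kv.2
      have hMb : t.foldl pvMinStep kv.2 ≠ b := by omega
      by_cases h2 : kv.2 = t.foldl pvMinStep kv.2
      · rw [← h2]
        have h2b : kv.2 ≠ b := by omega
        simp [h2b]
      · simp [h2, hMb, Ne.symm h2]
    · have hstep : pvMinStep b kv = b := by simp [pvMinStep, h1]
      simp only [hstep]
      have hub : t.foldl pvMinStep b ≤ b := foldl_minStep_le t b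
      by_cases h2 : kv.2 = b
      · have hB : pvBStepMin (acc, some b) kv = (acc ++ [kv.1], some b) := by
          simp [pvBStepMin, h2]
        rw [hB, ih]
        by_cases h3 : t.foldl pvMinStep b = b
        · have h4 : kv.2 = t.foldl pvMinStep b := by omega
          simp [h3, h4, List.append_assoc]
        · have h4 : ¬ kv.2 = t.foldl pvMinStep b := by omega
          simp [h3, h4]
      · have hB : pvBStepMin (acc, some b) kv = (acc, some b) := by
          simp [pvBStepMin, h1, h2]
        rw [hB, ih]
        have h4 : ¬ kv.2 = t.foldl pvMinStep b := by omega
        simp [h4]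

-- ===== VERDICT (by name: the statement is the Claim_ definition above) =====
theorem get_list_of_best_scores_spec : Claim_equal_get_list_of_best_scores := by
  intro candidates reverse _dom
  unfold Spec_get_list_of_best_scores get_list_of_best_scores get_list_of_best_scores_alt
  cases reverse with
  | false =>
    simp only [Bool.false_eq_true, if_false]
    rw [collect_eq_filter, bmax_char]
    simp
  | true =>
    simp only [if_true]
    cases candidates with
    | nil => simp
    | cons kv t =>
      -- A's min_score over kv::t starting at max_score equals the min over t starting at kv.2
      have hhead : kv.2 ≤ (kv :: t).foldl pvMaxStep 0 := by
        rw [List.foldl_cons]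
        refine le_trans ?_ (le_foldl_maxStep t (pvMaxStep 0 kv))
        simp only [pvMaxStep]; split_ifs with h <;> omega
      have hmin : (kv :: t).foldl pvMinStep ((kv :: t).foldl pvMaxStep 0)
            = t.foldl pvMinStep kv.2 := by
        rw [List.foldl_cons (f := pvMinStep)]
        congr 1
        simp only [pvMinStep]
        split_ifs with h <;> omega
      rw [hmin, collect_eq_filter]
      rw [List.foldl_cons (f := pvBStepMin)]
      have hB : pvBStepMin (([] : List String), (none : Option Int)) kv
          = ([kv.1], some kv.2) := by simp [pvBStepMin]
      rw [hB, bmin_char]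
      have hle : t.foldl pvMinStep kv.2 ≤ kv.2 := foldl_minStep_le t kv.2
      simp only [List.filter_cons, List.nil_append]
      by_cases h2 : kv.2 = t.foldl pvMinStep kv.2
      · rw [← h2]
        simp
      · simp [h2, Ne.symm h2]
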